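-- pv_equiv track=rewrite | github.com/AlexJPorter/AllCodeProjectSummer2018 | DiscreteStructures2/FleuryInsanity.py | consolidateCycle
-- ===== SOURCE A (Python) =====
-- def consolidateCycle(cycleList) :
--     if len(cycleList) == 1 :
--         return cycleList[0]
--     #Exit condition, there is only one cycle in the list
--     else :
--             for cycle in range(len(cycleList)) :
--                 #For each cycle in the list
--                 for vertex in range(len(cycleList[cycle])) :
--                     #for each vertex in each cycle
--                     for cycle2 in range(len(cycleList)) :
--                         #for each cycle in the list, but different from above
--                         if cycle == cycle2 :
--                             continue
--                         #Only consolidate different cycles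
--                         if cycleList[cycle][vertex] == cycleList[cycle2][0] :
--                             #if the vertex of the super cycle is the same as the start(and end)
--                             #of the subcycle
--                             cycleList[cycle][vertex : vertex + 1] = cycleList[cycle2]
--                             #replace the vertex with the cycle
--                             del cycleList[cycle2]
--                             #delete the subcycle from the list
--                             return consolidateCycle(cycleList)
-- ===== SOURCE B (Python) =====
-- def consolidateCycle(cycleList):
--     # Iterative merge loop; each round builds a head-index (first vertex -> cycle
--     # indices) once, so the inner cycle2 scan of A disappears.
--     while len(cycleList) != 1:
--         heads = {}
--         for i, c in enumerate(cycleList):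
--             if c:
--                 heads.setdefault(c[0], []).append(i)
--         found = None
--         for i, c in enumerate(cycleList):
--             for v, x in enumerate(c):
--                 j = next((k for k in heads.get(x, ()) if k != i), None)
--                 if j is not None:
--                     found = (i, v, j)
--                     break
--             if found is not None:
--                 break
--         if found is None:
--             return None
--         i, v, j = found
--         cycleList[i][v:v + 1] = cycleList[j]
--         del cycleList[j]
--     return cycleList[0]
-- ===== Notes on version B (the rewrite author's own statement) =====
-- stated objective: faster
-- what changed: Replaces A's recursion-per-merge triple scan by an iterative loop that builds a head-index dict (first vertex -> cycle indices) once per merge round, so A's inner cycle2 scan becomes a single dict lookup.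
import Mathlib
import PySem

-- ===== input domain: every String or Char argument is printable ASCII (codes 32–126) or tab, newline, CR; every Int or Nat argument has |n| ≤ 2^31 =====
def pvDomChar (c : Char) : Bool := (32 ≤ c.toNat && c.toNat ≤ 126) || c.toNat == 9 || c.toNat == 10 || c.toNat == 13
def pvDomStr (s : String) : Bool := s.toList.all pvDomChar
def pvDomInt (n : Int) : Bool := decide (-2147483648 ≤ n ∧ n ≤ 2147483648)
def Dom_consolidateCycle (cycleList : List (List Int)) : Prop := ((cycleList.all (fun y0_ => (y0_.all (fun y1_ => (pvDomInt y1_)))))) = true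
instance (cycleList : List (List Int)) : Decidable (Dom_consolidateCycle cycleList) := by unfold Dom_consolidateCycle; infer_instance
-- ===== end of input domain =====

-- B replaces A's recursion by an iterative merge loop that builds a head-index
-- (first vertex -> cycle indices) once per round, removing A's inner cycle2 scan;
-- only the RETURN VALUE is proved equal — both Pythons mutate cycleList in place
-- in the same way.

-- ===== PORT A =====
-- Python's range(len(..)) indices are always in range here, so the port uses Nat
-- indices with List.range / List.getD (exact on in-range indices).
-- Python evaluates cycleList[cycle2][0], which raises IndexError when cycle2 is an
-- empty cycle (such inputs are outside Pre_); there the port's `head? == some x`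
-- test is simply false.
def aFindC2 (L : List (List Int)) (cycle : Nat) (x : Int) : Option Nat :=
  (List.range L.length).find? (fun c2 => decide (c2 ≠ cycle) && ((L.getD c2 []).head? == some x))

-- the triple loop: first (cycle, vertex, cycle2) match, in A's scan order
def aScan (L : List (List Int)) : Option (Nat × Nat × Nat) :=
  (List.range L.length).findSome? (fun cycle =>
    (List.range (L.getD cycle []).length).findSome? (fun vertex =>
      (aFindC2 L cycle ((L.getD cycle []).getD vertex 0)).map (fun c2 => (cycle, vertex, c2))))

-- cycleList[cycle][vertex : vertex + 1] = cycleList[cycle2]; del cycleList[cycle2]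
def aMerge (L : List (List Int)) (cycle vertex c2 : Nat) : List (List Int) :=
  (L.set cycle ((L.getD cycle []).take vertex ++ L.getD c2 [] ++ (L.getD cycle []).drop (vertex + 1))).eraseIdx c2

-- A's recursion, made structural with a fuel guard only (fuel = list length is
-- always sufficient: every recursive call removes one cycle; fuel 0 forces the
-- list empty, where the loops run zero times and Python falls through to None)
def aLoop : Nat → List (List Int) → Option (List Int)
  | 0, _ => none
  | fuel + 1, L =>
    if L.length = 1 then PySem.List.pyGet? L 0
    else
      match aScan L with
      | none => none
      | some (c, v, c2) => aLoop fuel (aMerge L c v c2)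

def consolidateCycle (cycleList : List (List Int)) : Option (List Int) :=
  aLoop cycleList.length cycleList

-- ===== PORT B =====
-- heads.setdefault(c[0], []).append(i), skipping empty cycles ('if c:')
def bStep (d : PySem.Dict Int (List Nat)) (p : List Int × Nat) : PySem.Dict Int (List Nat) :=
  match p.1.head? with
  | some x => d.insert x (d.getD x [] ++ [p.2])
  | none => d

-- one head-index built per merge round: first vertex -> indices of the cycles starting with it
def bHeads (L : List (List Int)) : PySem.Dict Int (List Nat) :=
  L.zipIdx.foldl bStep PySem.Dict.empty

-- the double loop over (i, c) and (x, v) with a dict lookup instead of A's cycle2 scan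
def bScan (L : List (List Int)) : Option (Nat × Nat × Nat) :=
  let heads := bHeads L
  L.zipIdx.findSome? (fun ci =>
    ci.1.zipIdx.findSome? (fun xv =>
      ((heads.getD xv.1 []).find? (fun k => decide (k ≠ ci.2))).map (fun j => (ci.2, xv.2, j))))

-- cycleList[i][v : v + 1] = cycleList[j]; del cycleList[j]
def bMerge (L : List (List Int)) (i v j : Nat) : List (List Int) :=
  (L.set i ((L.getD i []).take v ++ L.getD j [] ++ (L.getD i []).drop (v + 1))).eraseIdx j

-- B's while loop, same fuel guard as A's port (fuel = list length suffices)
def bLoop : Nat → List (List Int) → Option (List Int)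
  | 0, _ => none
  | fuel + 1, L =>
    if L.length ≠ 1 then
      match bScan L with
      | none => none
      | some (i, v, j) => bLoop fuel (bMerge L i v j)
    else PySem.List.pyGet? L 0

def consolidateCycle_alt (cycleList : List (List Int)) : Option (List Int) :=
  bLoop cycleList.length cycleList

-- ===== PRECONDITION & SPEC =====
-- Pre_ excludes exactly the inputs on which Python A raises IndexError (at
-- cycleList[cycle2][0]): lists of ≥ 2 cycles mixing empty and nonempty cycles
-- (there B returns None, as for any other list it cannot merge down to one).
def Pre_consolidateCycle (cycleList : List (List Int)) : Prop :=
  cycleList.length ≤ 1 ∨ (∀ c ∈ cycleList, c ≠ []) ∨ (∀ c ∈ cycleList, c = [])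
instance (cycleList : List (List Int)) : Decidable (Pre_consolidateCycle cycleList) := by unfold Pre_consolidateCycle; infer_instance

def pvWitness_consolidateCycle : List (List Int) := [[1, 2], [2, 3]]

def Spec_consolidateCycle (cycleList : List (List Int)) (out : Option (List Int)) : Prop := out = consolidateCycle_alt cycleList
instance (cycleList : List (List Int)) (out : Option (List Int)) : Decidable (Spec_consolidateCycle cycleList out) := by unfold Spec_consolidateCycle; infer_instance

-- ===== CLAIM (what is proved, stated in full; the proofs are below) =====
def Claim_equal_consolidateCycle : Prop := ∀ (cycleList : List (List Int)), Dom_consolidateCycle cycleList → Pre_consolidateCycle cycleList → Spec_consolidateCycle cycleList (consolidateCycle cycleList)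

-- ===== LEMMAS AND PROOFS =====

theorem find?_congr_mem {α : Type} (l : List α) (p q : α → Bool)
    (h : ∀ a ∈ l, p a = q a) : l.find? p = l.find? q := by
  induction l with
  | nil => rfl
  | cons a l ih =>
    rw [List.find?_cons, List.find?_cons, h a (List.mem_cons_self ..)]
    cases q a with
    | true => rfl
    | false => exact ih fun a ha => h a (List.mem_cons_of_mem _ ha)

theorem findSome?_congr_mem {α β : Type} (l : List α) (f g : α → Option β)
    (h : ∀ a ∈ l, f a = g a) : l.findSome? f = l.findSome? g := by
  induction l with
  | nil => rfl
  | cons a l ih =>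
    rw [List.findSome?_cons, List.findSome?_cons, h a (List.mem_cons_self ..)]
    cases g a with
    | none => exact ih fun a ha => h a (List.mem_cons_of_mem _ ha)
    | some b => rfl

theorem range_len_eq_map_snd_zipIdx {α : Type} (l : List α) :
    List.range l.length = l.zipIdx.map Prod.snd := by
  rw [List.range_eq_range', List.zipIdx_map_snd]

-- the head-index build loop, characterised: d.getD x accumulates the indices of
-- the scanned cycles whose first vertex is x, in scan order
theorem bHeads_aux (l : List (List Int)) (n : Nat) (d : PySem.Dict Int (List Nat)) (x : Int) :
    ((l.zipIdx n).foldl bStep d).getD x [] =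
      d.getD x [] ++ ((l.zipIdx n).filter (fun p => p.1.head? == some x)).map Prod.snd := by
  induction l generalizing n d with
  | nil => simp
  | cons a l ih =>
    rw [List.zipIdx_cons, List.foldl_cons, List.filter_cons]
    cases ha : a.head? with
    | none => simp [bStep, ha, ih]
    | some y =>
      by_cases hxy : x = y
      · subst hxy
        simp [bStep, ha, ih]
      · simp [bStep, ha, ih, PySem.Dict.getD_insert, hxy, Ne.symm hxy]

theorem bHeads_getD (L : List (List Int)) (x : Int) :
    (bHeads L).getD x [] = (L.zipIdx.filter (fun p => p.1.head? == some x)).map Prod.snd := by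
  simpa [PySem.Dict.getD_empty] using bHeads_aux L 0 PySem.Dict.empty x

-- A's cycle2 scan = B's lookup in the head index
theorem inner_eq (L : List (List Int)) (i : Nat) (x : Int) :
    aFindC2 L i x = ((bHeads L).getD x []).find? (fun k => decide (k ≠ i)) := by
  rw [bHeads_getD, aFindC2, range_len_eq_map_snd_zipIdx, List.find?_map, List.find?_map,
    List.find?_filter]
  refine congrArg (Option.map Prod.snd) (find?_congr_mem _ _ _ fun p hp => ?_)
  obtain ⟨c, k⟩ := p
  obtain ⟨-, hk, hc⟩ := List.mem_zipIdx hp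
  simp only [Nat.sub_zero] at hc
  simp only [Function.comp, List.getD_eq_getElem _ _ (by simpa using hk), ← hc]
  simp [Bool.and_comm, Bool.beq_eq_decide_eq]

theorem scan_eq (L : List (List Int)) : aScan L = bScan L := by
  rw [aScan, bScan, range_len_eq_map_snd_zipIdx, List.findSome?_map]
  refine findSome?_congr_mem _ _ _ fun p hp => ?_
  obtain ⟨c, i⟩ := p
  obtain ⟨-, hi, hc⟩ := List.mem_zipIdx hp
  simp only [Nat.sub_zero] at hc
  have hgetD : L.getD i [] = c := by
    rw [List.getD_eq_getElem _ _ (by simpa using hi), ← hc]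
  simp only [Function.comp, hgetD]
  rw [range_len_eq_map_snd_zipIdx, List.findSome?_map]
  refine findSome?_congr_mem _ _ _ fun q hq => ?_
  obtain ⟨x, v⟩ := q
  obtain ⟨-, hv, hx⟩ := List.mem_zipIdx hq
  simp only [Nat.sub_zero] at hx
  have hgx : c.getD v 0 = x := by
    rw [List.getD_eq_getElem _ _ (by simpa using hv), ← hx]
  simp only [Function.comp, hgx, inner_eq]

theorem merge_eq : bMerge = aMerge := rfl

theorem loop_eq (fuel : Nat) (L : List (List Int)) : aLoop fuel L = bLoop fuel L := by
  induction fuel generalizing L with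
  | zero => rfl
  | succ fuel ih =>
    rw [aLoop, bLoop]
    by_cases h : L.length = 1
    · simp [h]
    · simp only [h, if_neg, if_pos, ne_eq, not_false_iff, scan_eq L]
      cases bScan L with
      | none => simp
      | some t =>
        obtain ⟨c, v, j⟩ := t
        simp [merge_eq, ih]

theorem ports_eq (L : List (List Int)) : consolidateCycle L = consolidateCycle_alt L := by
  rw [consolidateCycle, consolidateCycle_alt, loop_eq]

-- ===== VERDICT (by name: the statement is the Claim_ definition above) =====
theorem consolidateCycle_spec : Claim_equal_consolidateCycle := by
  intro L _ _
  unfold Spec_consolidateCycle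
  exact ports_eq L
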